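-- pv_equiv track=rewrite | github.com/arodio/FedCIS | specs/generate_data.py | factorise_three_layer
-- ===== SOURCE A (Python) =====
-- from typing import List, Tuple, Dict
--
-- def factorise_three_layer(n: int) -> Tuple[int, List[int]]:
--     """
--     'Roundest' 3-layer decomposition  n = 1 + d + Σ g_i   (root + middles + leaves)
--     Returns d and [g₁ … g_d] so that |g-d| is minimum when a perfect tree exists,
--     otherwise distributes the remainder as evenly as possible.
--
--     Logic copied (verbatim) from make_3layer_tree._roundest_factorisation.
--     """
--     candidates: list[tuple[int, int, int]] = []        # (|g-d|, d, g)
--     for d in range(1, n):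
--         leaves = n - 1 - d
--         if leaves < d:
--             break
--         g, r = divmod(leaves, d)
--         if r == 0:
--             candidates.append((abs(g - d), d, g))
--
--     if candidates:                                      # perfect tree exists
--         _, d, g = min(candidates)
--         return d, [g] * d
--
--     # otherwise minimise the remainder
--     best: Tuple[int, int, int] | None = None           # (rem, d, g)
--     for d in range(1, n):
--         leaves = n - 1 - d
--         if leaves < d:
--             break
--         g, r = divmod(leaves, d)
--         if best is None or r < best[0]:
--             best = (r, d, g)
--     if best is None:
--         raise ValueError("cannot form a 3-layer tree with so few nodes")
--     r, d, g = best
--     return d, [g + 1] * r + [g] * (d - r)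
-- ===== SOURCE B (Python) =====
-- from typing import List, Tuple
--
-- def factorise_three_layer(n: int) -> Tuple[int, List[int]]:
--     """
--     Same result as A, but in O(sqrt n): every viable d must divide n-1
--     (a perfect tree always exists via d=1 once n >= 3), so enumerate the
--     divisors of m = n-1 by a sqrt scan, keep those with 2*d <= m in
--     increasing order, and take the lexicographic minimum of (|g-d|, d, g).
--     """
--     m = n - 1
--     if m < 2:
--         raise ValueError("cannot form a 3-layer tree with so few nodes")
--     small: List[int] = []
--     large: List[int] = []
--     d = 1
--     while d * d <= m:
--         if m % d == 0:
--             small.append(d)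
--             e = m // d
--             if e != d and 2 * e <= m:
--                 large.append(e)
--         d += 1
--     divisors = small + large[::-1]
--     _, d, g = min((abs((m - dd) // dd - dd), dd, (m - dd) // dd) for dd in divisors)
--     return d, [g] * d
-- ===== Notes on version B (the rewrite author's own statement) =====
-- stated objective: faster
-- what changed: Instead of scanning every d in range(1, n) (twice in A), B enumerates the divisors of n-1 by a sqrt scan (small divisors plus their cofactors), keeps those with 2*d <= n-1 in increasing order, and takes the same lexicographic minimum of (|g-d|, d, g); A's second remainder-minimising loop is dead code for n >= 3 since d=1 always yields a perfect tree.
import Mathlib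
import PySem

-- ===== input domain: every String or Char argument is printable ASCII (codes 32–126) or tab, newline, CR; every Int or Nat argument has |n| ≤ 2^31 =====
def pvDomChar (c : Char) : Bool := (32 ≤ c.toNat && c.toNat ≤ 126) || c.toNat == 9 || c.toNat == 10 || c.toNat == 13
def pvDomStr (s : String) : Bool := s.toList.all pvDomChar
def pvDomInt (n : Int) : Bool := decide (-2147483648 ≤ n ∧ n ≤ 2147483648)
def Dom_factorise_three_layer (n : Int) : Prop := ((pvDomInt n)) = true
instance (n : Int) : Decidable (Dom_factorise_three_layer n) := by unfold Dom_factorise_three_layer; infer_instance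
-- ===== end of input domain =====

-- B replaces A's two O(n) scans by a single O(sqrt n) divisor scan of n-1 and the same lexicographic minimum.


-- ===== PORT A =====

-- Python's `min` on a list of int-triples: lexicographic comparison, first minimal element.
-- (ported by hand, exact: PySem.List.min? takes a single key, tuple comparison is spelled out)
def pvLt3 (x y : Int × Int × Int) : Bool :=
  decide (x.1 < y.1) || (decide (x.1 = y.1) &&
    (decide (x.2.1 < y.2.1) || (decide (x.2.1 = y.2.1) && decide (x.2.2 < y.2.2))))

def pyMin3 : List (Int × Int × Int) → Option (Int × Int × Int)
  | [] => none
  | x :: t => some (t.foldl (fun best y => if pvLt3 y best then y else best) x)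

-- A's first loop: `for d in range(1, n): … break … candidates.append(…)`
def pvCollectA (n : Int) : List Int → List (Int × Int × Int)
  | [] => []
  | d :: rest =>
    let leaves := n - 1 - d
    if leaves < d then []
    else
      let g := PySem.Int.floordiv leaves d
      let r := PySem.Int.mod leaves d
      if r = 0 then (|g - d|, d, g) :: pvCollectA n rest
      else pvCollectA n rest

-- A's second loop: running best (rem, d, g) with strict `<` update
def pvBestA (n : Int) : List Int → Option (Int × Int × Int) → Option (Int × Int × Int)
  | [], best => best
  | d :: rest, best =>
    let leaves := n - 1 - d
    if leaves < d then best
    else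
      let g := PySem.Int.floordiv leaves d
      let r := PySem.Int.mod leaves d
      match best with
      | none => pvBestA n rest (some (r, d, g))
      | some b => if r < b.1 then pvBestA n rest (some (r, d, g)) else pvBestA n rest best

def factorise_three_layer (n : Int) : Int × List Int :=
  let candidates := pvCollectA n (PySem.List.pyRange 1 n 1)
  if candidates.isEmpty then
    match pvBestA n (PySem.List.pyRange 1 n 1) none with
    | none => (0, [])          -- Python raises ValueError here; excluded by Pre_
    | some (r, d, g) => (d, PySem.List.pyRepeat [g + 1] r ++ PySem.List.pyRepeat [g] (d - r))
  else
    match pyMin3 candidates with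
    | some (_, d, g) => (d, PySem.List.pyRepeat [g] d)
    | none => (0, [])          -- unreachable: candidates nonempty

-- ===== PORT B =====

-- B's while loop: d = 1,2,… while d*d <= m, collecting small divisors and their large cofactors
def pvLoopB (m : Int) : Nat → Int → List Int → List Int → List Int × List Int
  | 0, _, s, l => (s, l)
  | fuel + 1, d, s, l =>
    if d * d ≤ m then
      if PySem.Int.mod m d = 0 then
        let e := PySem.Int.floordiv m d
        if e ≠ d ∧ 2 * e ≤ m then pvLoopB m fuel (d + 1) (s ++ [d]) (l ++ [e])
        else pvLoopB m fuel (d + 1) (s ++ [d]) l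
      else pvLoopB m fuel (d + 1) s l
    else (s, l)

def factorise_three_layer_alt (n : Int) : Int × List Int :=
  let m := n - 1
  if m < 2 then (0, [])        -- Python raises ValueError here; excluded by Pre_
  else
    let p := pvLoopB m (m.toNat + 1) 1 [] []
    let divisors := p.1 ++ p.2.reverse      -- small + large[::-1]
    match pyMin3 (divisors.map (fun dd =>
        (|PySem.Int.floordiv (m - dd) dd - dd|, dd, PySem.Int.floordiv (m - dd) dd))) with
    | some (_, d, g) => (d, PySem.List.pyRepeat [g] d)
    | none => (0, [])          -- unreachable: 1 is always a divisor

-- ===== PRECONDITION & SPEC =====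
-- Pre_ excludes exactly n ≤ 2, where the Python A (and B) raises ValueError.
def Pre_factorise_three_layer (n : Int) : Prop := 3 ≤ n
instance (n : Int) : Decidable (Pre_factorise_three_layer n) := by
  unfold Pre_factorise_three_layer; infer_instance

def pvWitness_factorise_three_layer : Int := (7)

def Spec_factorise_three_layer (n : Int) (out : Int × List Int) : Prop :=
  out = factorise_three_layer_alt n
instance (n : Int) (out : Int × List Int) : Decidable (Spec_factorise_three_layer n out) := by
  unfold Spec_factorise_three_layer; infer_instance

-- ===== CLAIM (what is proved, stated in full; the proofs are below) =====
def Claim_equal_factorise_three_layer : Prop :=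
  ∀ (n : Int), Dom_factorise_three_layer n → Pre_factorise_three_layer n →
    Spec_factorise_three_layer n (factorise_three_layer n)


-- ===== LEMMAS AND PROOFS =====

-- proof-side helpers: candidate triple, A's divisor list, B's small/large divisor lists
def pvCandF (m : Int) (d : Int) : Int × Int × Int :=
  (|PySem.Int.floordiv (m - d) d - d|, d, PySem.Int.floordiv (m - d) d)

def pvADivs (m : Int) : List Int :=
  (PySem.List.pyRange 1 (m + 1) 1).filter
    (fun d => decide (d ≤ m - d) && decide (PySem.Int.mod (m - d) d = 0))

def pvSmall (m d : Int) : List Int :=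
  (PySem.List.pyRange d (m + 1) 1).filter
    (fun x => decide (x * x ≤ m) && decide (PySem.Int.mod m x = 0))

def pvLargePred (m : Int) (x : Int) : Bool :=
  decide (x * x ≤ m) && decide (PySem.Int.mod m x = 0) &&
    decide (PySem.Int.floordiv m x ≠ x) && decide (2 * PySem.Int.floordiv m x ≤ m)

def pvLarge (m d : Int) : List Int :=
  ((PySem.List.pyRange d (m + 1) 1).filter (pvLargePred m)).map
    (fun x => PySem.Int.floordiv m x)

lemma pvCollectA_eq (n : Int) (l : List Int) :
    pvCollectA n l =
      ((l.takeWhile (fun d => decide (d ≤ n - 1 - d))).filter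
        (fun d => decide (PySem.Int.mod (n - 1 - d) d = 0))).map (pvCandF (n - 1)) := by
  induction l with
  | nil => simp [pvCollectA]
  | cons d rest ih =>
    by_cases h : n - 1 - d < d
    · have h' : ¬ (d ≤ n - 1 - d) := by omega
      simp [pvCollectA, h, h']
    · have h' : d ≤ n - 1 - d := by omega
      by_cases hr : PySem.Int.mod (n - 1 - d) d = 0 <;>
        simp [pvCollectA, h, h', hr, ih, pvCandF]

lemma takeWhile_le_eq_filter (m : Int) (l : List Int) (hl : l.Pairwise (· < ·)) :
    l.takeWhile (fun d => decide (d ≤ m - d)) = l.filter (fun d => decide (d ≤ m - d)) := by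
  induction l with
  | nil => rfl
  | cons a t ih =>
    rcases List.pairwise_cons.mp hl with ⟨ha, ht⟩
    by_cases h : a ≤ m - a
    · simp [h, ih ht]
    · simp only [List.takeWhile_cons, List.filter_cons, h, decide_false]
      simp only [Bool.false_eq_true, if_false]
      symm
      rw [List.filter_eq_nil_iff]
      intro x hx
      have := ha x hx
      simp only [decide_eq_true_eq]
      omega

lemma candidates_eq (n : Int) :
    pvCollectA n (PySem.List.pyRange 1 n 1) = (pvADivs (n - 1)).map (pvCandF (n - 1)) := by
  rw [pvCollectA_eq,
    takeWhile_le_eq_filter (n - 1) _ (PySem.List.pairwise_lt_pyRange_one 1 n),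
    List.filter_filter]
  unfold pvADivs
  have hn : n - 1 + 1 = n := by ring
  rw [hn]
  congr 1
  apply List.filter_congr
  intro x _
  simp [Bool.and_comm]

lemma pvSmall_nil (m d : Int) (hd : 1 ≤ d) (h : m < d * d) : pvSmall m d = [] := by
  rw [pvSmall, List.filter_eq_nil_iff]
  intro x hx
  rw [PySem.List.mem_pyRange_one] at hx
  have : ¬ (x * x ≤ m) := by nlinarith
  simp [this]

lemma pvLarge_nil (m d : Int) (hd : 1 ≤ d) (h : m < d * d) : pvLarge m d = [] := by
  rw [pvLarge, List.map_eq_nil_iff, List.filter_eq_nil_iff]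
  intro x hx
  rw [PySem.List.mem_pyRange_one] at hx
  have : ¬ (x * x ≤ m) := by nlinarith
  simp [pvLargePred, this]

lemma pvLoopB_spec (m : Int) : ∀ (fuel : Nat) (d : Int) (s l : List Int), 1 ≤ d →
    m < (d + (fuel : Int)) * (d + (fuel : Int)) →
    pvLoopB m fuel d s l = (s ++ pvSmall m d, l ++ pvLarge m d) := by
  intro fuel
  induction fuel with
  | zero =>
    intro d s l hd hlt
    push_cast at hlt
    simp only [add_zero] at hlt
    simp [pvLoopB, pvSmall_nil m d hd hlt, pvLarge_nil m d hd hlt]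
  | succ fuel ih =>
    intro d s l hd hlt
    by_cases hdd : d * d ≤ m
    · have hdm : d ≤ m := by nlinarith
      have hcons : PySem.List.pyRange d (m + 1) 1 = d :: PySem.List.pyRange (d + 1) (m + 1) 1 :=
        PySem.List.pyRange_one_cons (by omega)
      have hb : m < (d + 1 + (fuel : Int)) * (d + 1 + (fuel : Int)) := by
        push_cast at hlt ⊢; nlinarith [hlt]
      by_cases hmod : PySem.Int.mod m d = 0
      · have hsm : pvSmall m d = d :: pvSmall m (d + 1) := by
          rw [pvSmall, hcons, List.filter_cons]
          simp [hdd, hmod, pvSmall]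
        by_cases he : PySem.Int.floordiv m d ≠ d ∧ 2 * PySem.Int.floordiv m d ≤ m
        · have hlg : pvLarge m d = PySem.Int.floordiv m d :: pvLarge m (d + 1) := by
            rw [pvLarge, hcons, List.filter_cons]
            simp [pvLargePred, hdd, hmod, he.1, he.2, pvLarge]
          rw [pvLoopB]
          rw [if_pos hdd, if_pos hmod, if_pos he]
          rw [ih (d + 1) _ _ (by omega) hb, hsm, hlg]
          simp
        · have hlg : pvLarge m d = pvLarge m (d + 1) := by
            rw [pvLarge, hcons, List.filter_cons]
            have : pvLargePred m d = false := by
              rcases Decidable.not_and_iff_or_not.mp he with h' | h' <;>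
                simp [pvLargePred, h']
            simp [this, pvLarge]
          rw [pvLoopB]
          rw [if_pos hdd, if_pos hmod, if_neg he]
          rw [ih (d + 1) _ _ (by omega) hb, hsm, hlg]
          simp
      · have hsm : pvSmall m d = pvSmall m (d + 1) := by
          rw [pvSmall, hcons, List.filter_cons]
          simp [hmod, pvSmall]
        have hlg : pvLarge m d = pvLarge m (d + 1) := by
          rw [pvLarge, hcons, List.filter_cons]
          simp [pvLargePred, hmod, pvLarge]
        rw [pvLoopB]
        rw [if_pos hdd, if_neg hmod]
        rw [ih (d + 1) _ _ (by omega) hb, hsm, hlg]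
    · rw [pvLoopB]
      rw [if_neg hdd]
      rw [pvSmall_nil m d hd (by omega), pvLarge_nil m d hd (by omega)]
      simp

lemma mem_pvADivs (m x : Int) (_hm : 2 ≤ m) :
    x ∈ pvADivs m ↔ 1 ≤ x ∧ x ∣ m ∧ 2 * x ≤ m := by
  rw [pvADivs, List.mem_filter, PySem.List.mem_pyRange_one]
  simp only [Bool.and_eq_true, decide_eq_true_eq, PySem.Int.mod_eq_zero_iff_dvd]
  constructor
  · rintro ⟨⟨h1, h2⟩, h3, h4⟩
    have hxm : x ∣ m := by
      have := h4.add (dvd_refl x)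
      simpa using this
    exact ⟨h1, hxm, by omega⟩
  · rintro ⟨h1, h2, h3⟩
    exact ⟨⟨h1, by omega⟩, by omega, dvd_sub h2 (dvd_refl x)⟩

lemma mem_pvSmall (m x : Int) (hm : 2 ≤ m) :
    x ∈ pvSmall m 1 ↔ 1 ≤ x ∧ x ∣ m ∧ x * x ≤ m := by
  rw [pvSmall, List.mem_filter, PySem.List.mem_pyRange_one]
  simp only [Bool.and_eq_true, decide_eq_true_eq, PySem.Int.mod_eq_zero_iff_dvd]
  constructor
  · rintro ⟨⟨h1, h2⟩, h3, h4⟩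
    exact ⟨h1, h4, h3⟩
  · rintro ⟨h1, h2, h3⟩
    exact ⟨⟨h1, by nlinarith⟩, h3, h2⟩

lemma mem_pvLarge (m y : Int) (hm : 2 ≤ m) :
    y ∈ pvLarge m 1 ↔ 1 ≤ y ∧ y ∣ m ∧ m < y * y ∧ 2 * y ≤ m := by
  rw [pvLarge, List.mem_map]
  constructor
  · rintro ⟨x, hx, rfl⟩
    rw [List.mem_filter, PySem.List.mem_pyRange_one] at hx
    rcases hx with ⟨⟨hx1, hx2⟩, hp⟩
    simp only [pvLargePred, Bool.and_eq_true, decide_eq_true_eq,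
      PySem.Int.mod_eq_zero_iff_dvd] at hp
    rcases hp with ⟨⟨⟨hxx, hdvd⟩, hne⟩, h2e⟩
    have hx0 : 0 < x := by omega
    rw [PySem.Int.floordiv_eq_ediv_of_pos hx0] at *
    have hxy : x * (m / x) = m := Int.mul_ediv_cancel' hdvd
    have hy0 : 0 < m / x := by nlinarith
    have hxley : x ≤ m / x := le_of_mul_le_mul_left (by nlinarith) hx0
    have hxlty : x < m / x := lt_of_le_of_ne hxley (fun h => hne h.symm)
    refine ⟨by omega, ⟨x, by rw [mul_comm]; exact hxy.symm⟩, by nlinarith, h2e⟩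
  · rintro ⟨hy1, hydvd, hyy, h2y⟩
    have hy0 : 0 < y := by omega
    have hxy : y * (m / y) = m := Int.mul_ediv_cancel' hydvd
    set x := m / y with hxdef
    have hx0 : 0 < x := by nlinarith
    have hxlty : x < y := by nlinarith
    refine ⟨x, ?_, ?_⟩
    · rw [List.mem_filter, PySem.List.mem_pyRange_one]
      have hxdvd : x ∣ m := ⟨y, by rw [mul_comm]; exact hxy.symm⟩
      have hfd : PySem.Int.floordiv m x = y := by
        rw [PySem.Int.floordiv_eq_ediv_of_pos hx0, ← hxy, mul_comm]
        exact Int.mul_ediv_cancel_left y (by omega)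
      refine ⟨⟨by omega, by nlinarith⟩, ?_⟩
      simp only [pvLargePred, Bool.and_eq_true, decide_eq_true_eq,
        PySem.Int.mod_eq_zero_iff_dvd, hfd]
      exact ⟨⟨⟨by nlinarith, hxdvd⟩, by omega⟩, h2y⟩
    · rw [PySem.Int.floordiv_eq_ediv_of_pos hx0, ← hxy, mul_comm]
      exact Int.mul_ediv_cancel_left y (by omega)

lemma pairwise_pvADivs (m : Int) : (pvADivs m).Pairwise (· < ·) := by
  exact (PySem.List.pairwise_lt_pyRange_one 1 (m + 1)).filter _

lemma pairwise_pvSmall (m : Int) : (pvSmall m 1).Pairwise (· < ·) := by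
  exact (PySem.List.pairwise_lt_pyRange_one 1 (m + 1)).filter _

lemma pairwise_pvLarge (m : Int) (hm : 2 ≤ m) :
    (pvLarge m 1).Pairwise (fun a b => b < a) := by
  rw [pvLarge, List.pairwise_map]
  refine List.Pairwise.imp_of_mem ?_ ((PySem.List.pairwise_lt_pyRange_one 1 (m + 1)).filter (pvLargePred m))
  intro a b ha hb hab
  rw [List.mem_filter, PySem.List.mem_pyRange_one] at ha hb
  rcases ha with ⟨⟨ha1, _⟩, hpa⟩
  rcases hb with ⟨⟨hb1, _⟩, hpb⟩
  simp only [pvLargePred, Bool.and_eq_true, decide_eq_true_eq,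
    PySem.Int.mod_eq_zero_iff_dvd] at hpa hpb
  have ha0 : 0 < a := by omega
  have hb0 : 0 < b := by omega
  rw [PySem.Int.floordiv_eq_ediv_of_pos ha0, PySem.Int.floordiv_eq_ediv_of_pos hb0]
  have hA : a * (m / a) = m := Int.mul_ediv_cancel' hpa.1.1.2
  have hB : b * (m / b) = m := Int.mul_ediv_cancel' hpb.1.1.2
  have hya : 0 < m / a := by nlinarith
  have hyb : 0 < m / b := by nlinarith
  nlinarith

lemma divisors_eq (m : Int) (hm : 2 ≤ m) :
    pvSmall m 1 ++ (pvLarge m 1).reverse = pvADivs m := by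
  have hpwL : (pvSmall m 1 ++ (pvLarge m 1).reverse).Pairwise (· < ·) := by
    rw [List.pairwise_append]
    refine ⟨pairwise_pvSmall m, List.pairwise_reverse.mpr (pairwise_pvLarge m hm), ?_⟩
    intro a ha b hb
    rw [mem_pvSmall m a hm] at ha
    rw [List.mem_reverse, mem_pvLarge m b hm] at hb
    nlinarith [ha.1, ha.2.2, hb.1, hb.2.2.1]
  have hpwR : (pvADivs m).Pairwise (· < ·) := pairwise_pvADivs m
  refine List.Perm.eq_of_pairwise (fun a b _ _ h1 h2 => by omega) hpwL hpwR ?_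
  rw [List.perm_ext_iff_of_nodup (hpwL.imp fun h => ne_of_lt h) (hpwR.imp fun h => ne_of_lt h)]
  intro a
  rw [List.mem_append, List.mem_reverse, mem_pvSmall m a hm, mem_pvLarge m a hm,
    mem_pvADivs m a hm]
  constructor
  · rintro (⟨h1, h2, h3⟩ | ⟨h1, h2, h3, h4⟩)
    · refine ⟨h1, h2, ?_⟩
      by_cases ha1 : a = 1
      · omega
      · nlinarith
    · exact ⟨h1, h2, h4⟩
  · rintro ⟨h1, h2, h3⟩
    by_cases haa : a * a ≤ m
    · exact Or.inl ⟨h1, h2, haa⟩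
    · exact Or.inr ⟨h1, h2, by omega, h3⟩

-- ===== VERDICT (by name: the statement is the Claim_ definition above) =====
theorem factorise_three_layer_spec : Claim_equal_factorise_three_layer := by
  intro n _ hpre
  have h3 : 3 ≤ n := hpre
  have hm : 2 ≤ n - 1 := by omega
  unfold Spec_factorise_three_layer
  have hne : pvADivs (n - 1) ≠ [] :=
    List.ne_nil_of_mem ((mem_pvADivs (n - 1) 1 hm).mpr ⟨le_refl 1, one_dvd _, by omega⟩)
  -- A side
  have hA : factorise_three_layer n =
      match pyMin3 ((pvADivs (n - 1)).map (pvCandF (n - 1))) with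
      | some (_, d, g) => (d, PySem.List.pyRepeat [g] d)
      | none => (0, []) := by
    simp only [factorise_three_layer, candidates_eq n]
    have hie : ((pvADivs (n - 1)).map (pvCandF (n - 1))).isEmpty = false := by
      simp [hne]
    rw [hie]
    simp
  -- B side
  have hcast : ((((n - 1).toNat + 1 : Nat)) : Int) = n - 1 + 1 := by
    push_cast [Int.toNat_of_nonneg (show (0:Int) ≤ n - 1 by omega)]
    ring
  have hloop : pvLoopB (n - 1) ((n - 1).toNat + 1) 1 [] [] =
      ([] ++ pvSmall (n - 1) 1, [] ++ pvLarge (n - 1) 1) := by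
    apply pvLoopB_spec (n - 1) ((n - 1).toNat + 1) 1 [] [] (le_refl 1)
    rw [hcast]
    nlinarith
  have hB : factorise_three_layer_alt n =
      match pyMin3 ((pvADivs (n - 1)).map (pvCandF (n - 1))) with
      | some (_, d, g) => (d, PySem.List.pyRepeat [g] d)
      | none => (0, []) := by
    simp only [factorise_three_layer_alt]
    rw [if_neg (by omega : ¬ n - 1 < 2)]
    rw [hloop]
    simp only [List.nil_append]
    rw [divisors_eq (n - 1) hm]
    rfl
  rw [hA, hB]
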